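-- pv_equiv track=rewrite | github.com/aLexzzz430/Cognitive-OS | integrations/arc_agi3/perception_bridge.py | _background_color
-- ===== SOURCE A (Python) =====
-- from typing import Any, Dict, List, Optional, Sequence, Tuple
--
-- Grid = List[List[int]]
--
-- def _background_color(grid: Grid) -> int:
--     counts: Dict[int, int] = {}
--     for row in grid:
--         for value in row:
--             counts[int(value)] = counts.get(int(value), 0) + 1
--     if not counts:
--         return 0
--     if 0 in counts:
--         return 0
--     return max(counts.items(), key=lambda item: (item[1], -item[0]))[0]
-- ===== SOURCE B (Python) =====
-- def _background_color(grid):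
--     flat = sorted(int(v) for row in grid for v in row)
--     if not flat:
--         return 0
--     best = 0
--     best_n = 0
--     i = 0
--     n = len(flat)
--     while i < n:
--         if flat[i] == 0:
--             return 0
--         j = i + 1
--         while j < n and flat[j] == flat[i]:
--             j += 1
--         if j - i > best_n:
--             best, best_n = flat[i], j - i
--         i = j
--     return best
-- ===== Notes on version B (the rewrite author's own statement) =====
-- stated objective: alternative
-- what changed: Replaces the counting dict plus max over items with a (count,-color) key by sorting the flattened cells once and scanning equal-value runs with two indices, taking the first strictly longer run; no count table is ever built and the smallest-color tie-break falls out of the ascending scan.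
import Mathlib
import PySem

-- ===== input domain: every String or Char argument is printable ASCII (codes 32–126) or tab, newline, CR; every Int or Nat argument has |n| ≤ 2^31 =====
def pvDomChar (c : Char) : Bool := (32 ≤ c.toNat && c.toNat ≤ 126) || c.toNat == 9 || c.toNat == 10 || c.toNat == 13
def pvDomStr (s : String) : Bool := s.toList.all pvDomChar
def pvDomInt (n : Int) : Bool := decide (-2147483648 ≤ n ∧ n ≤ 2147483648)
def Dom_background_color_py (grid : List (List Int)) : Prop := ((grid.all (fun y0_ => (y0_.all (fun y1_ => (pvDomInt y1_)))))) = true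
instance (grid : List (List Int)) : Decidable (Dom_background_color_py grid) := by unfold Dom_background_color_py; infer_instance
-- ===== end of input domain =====

-- B replaces A's counting dict + max over items keyed by (count, -color) by sorting the flattened
-- cells once and scanning equal-value runs, keeping the first strictly longer run (alternative).

-- ===== PORT A =====
-- A's local dict `counts`, built value by value over the rows (a helper for the Python local)
def pvCountsA (grid : List (List Int)) : PySem.Dict Int Int :=
  grid.foldl (fun d row => row.foldl (fun d v => d.insert v (d.getD v 0 + 1)) d) PySem.Dict.empty

def background_color_py (grid : List (List Int)) : Int :=
  if (pvCountsA grid).items.isEmpty then 0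
  else if (pvCountsA grid).contains 0 then 0
  else
    match PySem.List.max2? (pvCountsA grid).items (fun p => p.2) (fun p => -p.1) with
    | some p => p.1
    | none => 0  -- unreachable: the dict is nonempty here, so Python's max receives a nonempty iterable

-- ===== PORT B =====
-- the outer while loop of Source B: at each step the inner while (j advancing over equal cells) is the
-- takeWhile/dropWhile split of the current suffix, `j - i` is 1 + the takeWhile length
def pvRunScan (l : List Int) (best bestn : Int) : Int :=
  match l with
  | [] => best
  | x :: t =>
    if x = 0 then 0
    else if (1 + ((t.takeWhile (fun y => y == x)).length : Int)) > bestn then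
      pvRunScan (t.dropWhile (fun y => y == x)) x (1 + ((t.takeWhile (fun y => y == x)).length : Int))
    else
      pvRunScan (t.dropWhile (fun y => y == x)) best bestn
termination_by l.length
decreasing_by
  all_goals simpa using Nat.lt_succ_of_le ((List.dropWhile_sublist _).length_le)

def background_color_py_alt (grid : List (List Int)) : Int :=
  if (PySem.List.sorted grid.flatten (fun x => x) false).isEmpty then 0
  else pvRunScan (PySem.List.sorted grid.flatten (fun x => x) false) 0 0

-- ===== PRECONDITION & SPEC =====
def Spec_background_color_py (grid : List (List Int)) (out : Int) : Prop := out = background_color_py_alt grid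
instance (grid : List (List Int)) (out : Int) : Decidable (Spec_background_color_py grid out) := by unfold Spec_background_color_py; infer_instance

-- ===== CLAIM (what is proved, stated in full; the proofs are below) =====
def Claim_equal_background_color_py : Prop := ∀ (grid : List (List Int)), Dom_background_color_py grid → Spec_background_color_py grid (background_color_py grid)

-- ===== LEMMAS AND PROOFS =====

-- the value with maximal count, smallest among ties, over flat
def pvBest (flat : List Int) (c : Int) : Prop :=
  c ∈ flat ∧ ∀ d ∈ flat, (flat.count d : Int) < (flat.count c : Int) ∨
    ((flat.count d : Int) = (flat.count c : Int) ∧ c ≤ d)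

lemma pvBest_uniq {flat : List Int} {c c' : Int} (h : pvBest flat c) (h' : pvBest flat c') :
    c = c' := by
  obtain ⟨hc, hall⟩ := h
  obtain ⟨hc', hall'⟩ := h'
  rcases hall c' hc' with h1 | ⟨h1, h2⟩
  · rcases hall' c hc with h3 | ⟨h3, h4⟩
    · omega
    · omega
  · rcases hall' c hc with h3 | ⟨h3, h4⟩
    · omega
    · exact le_antisymm h2 h4

-- the foldl inside PySem.List.max2?, started from `some a`, returns a lexicographic maximum
lemma pvMax2Aux {α : Type} (k1 k2 : α → Int) :
    ∀ (xs : List α) (a : α),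
      ∃ m, List.foldl (fun acc x =>
            match acc with
            | none => some x
            | some m =>
              if (decide (k1 m < k1 x) || !decide (k1 x < k1 m) && decide (k2 m < k2 x)) = true
              then some x else some m) (some a) xs = some m ∧
        (m = a ∨ m ∈ xs) ∧
        (k1 a < k1 m ∨ (k1 a = k1 m ∧ k2 a ≤ k2 m)) ∧
        ∀ y ∈ xs, k1 y < k1 m ∨ (k1 y = k1 m ∧ k2 y ≤ k2 m) := by
  intro xs
  induction xs with
  | nil =>
    intro a
    exact ⟨a, rfl, Or.inl rfl, Or.inr ⟨rfl, le_refl _⟩, by simp⟩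
  | cons x t ih =>
    intro a
    rw [List.foldl_cons]
    by_cases hc : (decide (k1 a < k1 x) || !decide (k1 x < k1 a) && decide (k2 a < k2 x)) = true
    · -- accumulator becomes x
      obtain ⟨m, hm, hmem, hxm, hall⟩ := ih x
      simp only [hc, if_pos]
      refine ⟨m, ?_, ?_, ?_, ?_⟩
      · simpa using hm
      · rcases hmem with rfl | hmt
        · exact Or.inr (List.mem_cons_self)
        · exact Or.inr (List.mem_cons_of_mem _ hmt)
      · -- lex a ≤ x ≤ m
        simp only [Bool.or_eq_true, Bool.and_eq_true, Bool.not_eq_true', decide_eq_true_eq,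
          decide_eq_false_iff_not] at hc
        omega
      · intro y hy
        rcases List.mem_cons.mp hy with rfl | hyt
        · exact hxm
        · exact hall y hyt
    · -- accumulator stays a
      rw [Bool.not_eq_true] at hc
      obtain ⟨m, hm, hmem, ham, hall⟩ := ih a
      refine ⟨m, by simpa [hc] using hm, ?_, ham, ?_⟩
      · rcases hmem with rfl | hmt
        · exact Or.inl rfl
        · exact Or.inr (List.mem_cons_of_mem _ hmt)
      · intro y hy
        rcases List.mem_cons.mp hy with rfl | hyt
        · simp only [Bool.or_eq_false_iff, Bool.and_eq_false_iff, Bool.not_eq_false',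
            decide_eq_false_iff_not, decide_eq_true_eq] at hc
          omega
        · exact hall y hyt

-- max2? (with these two Int keys) returns a lexicographic maximum element
lemma pvMax2_isSome {α : Type} (k1 k2 : α → Int) (x : α) (t : List α) :
    ∃ m, PySem.List.max2? (x :: t) k1 k2 = some m := by
  obtain ⟨m, hm, -⟩ := pvMax2Aux k1 k2 t x
  exact ⟨m, by rw [PySem.List.max2?, List.foldl_cons]; exact hm⟩

lemma pvMax2_spec {α : Type} (k1 k2 : α → Int) (xs : List α) (m : α)
    (h : PySem.List.max2? xs k1 k2 = some m) :
    m ∈ xs ∧ ∀ y ∈ xs, k1 y < k1 m ∨ (k1 y = k1 m ∧ k2 y ≤ k2 m) := by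
  cases xs with
  | nil => simp [PySem.List.max2?] at h
  | cons x t =>
    rw [PySem.List.max2?, List.foldl_cons] at h
    obtain ⟨m', hm', hmem, hxm, hall⟩ := pvMax2Aux k1 k2 t x
    have hmm : some m' = some m := hm'.symm.trans h
    obtain rfl : m' = m := Option.some.inj hmm
    refine ⟨?_, ?_⟩
    · rcases hmem with rfl | hmt
      · exact List.mem_cons_self
      · exact List.mem_cons_of_mem _ hmt
    · intro y hy
      rcases List.mem_cons.mp hy with rfl | hyt
      · exact hxm
      · exact hall y hyt

lemma pvMax2_none {α : Type} (k1 k2 : α → Int) (xs : List α)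
    (h : PySem.List.max2? xs k1 k2 = none) : xs = [] := by
  cases xs with
  | nil => rfl
  | cons x t =>
    obtain ⟨m, hm⟩ := pvMax2_isSome k1 k2 x t
    rw [hm] at h
    cases h

-- A's core (max over the counter's items, key (count, -color)) is the best value
lemma pvA_char (flat : List Int) (hne : flat ≠ []) :
    pvBest flat (match PySem.List.max2?
        ((PySem.Set.ofList flat).map (fun k => (k, (flat.count k : Int))))
        (fun p => p.2) (fun p => -p.1) with
      | some p => p.1
      | none => 0) := by
  obtain ⟨x, hx⟩ := List.exists_mem_of_ne_nil flat hne
  have hxS : x ∈ PySem.Set.ofList flat := (PySem.Set.mem_ofList _ _).mpr hx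
  rcases hm : PySem.List.max2?
      ((PySem.Set.ofList flat).map (fun k => (k, (flat.count k : Int))))
      (fun p => p.2) (fun p => -p.1) with _ | m
  · exfalso
    have h := pvMax2_none _ _ _ hm
    rw [List.map_eq_nil_iff] at h
    rw [h] at hxS
    cases hxS
  · obtain ⟨hmem, hmax⟩ := pvMax2_spec _ _ _ _ hm
    obtain ⟨c, hcS, hcm⟩ := List.mem_map.mp hmem
    subst hcm
    show pvBest flat c
    refine ⟨(PySem.Set.mem_ofList _ _).mp hcS, ?_⟩
    intro d hd
    have hdm : (d, (flat.count d : Int)) ∈ (PySem.Set.ofList flat).map (fun k => (k, (flat.count k : Int))) :=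
      List.mem_map_of_mem ((PySem.Set.mem_ofList _ _).mpr hd)
    have h := hmax _ hdm
    simp only at h
    rcases h with h1 | ⟨h1, h2⟩
    · exact Or.inl h1
    · exact Or.inr ⟨h1, by omega⟩

-- in a sorted suffix x :: t, everything past the leading run of x is strictly greater than x
lemma pvDrop_gt (x : Int) :
    ∀ (t : List Int), t.Pairwise (· ≤ ·) → (∀ y ∈ t, x ≤ y) →
      ∀ y ∈ t.dropWhile (fun y => y == x), x < y := by
  intro t
  induction t with
  | nil => intro _ _ y hy; simp [List.dropWhile] at hy
  | cons a t' ih =>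
    intro hp hle y hy
    rw [List.dropWhile] at hy
    by_cases ha : a = x
    · subst ha
      simp only [BEq.rfl] at hy
      exact ih (List.pairwise_cons.mp hp).2
        (fun z hz => hle z (List.mem_cons_of_mem _ hz)) y hy
    · have : (a == x) = false := by simpa using ha
      rw [this] at hy
      have hxa : x < a :=
        lt_of_le_of_ne (hle a List.mem_cons_self) (fun h => ha h.symm)
      rcases List.mem_cons.mp hy with rfl | hyt
      · exact hxa
      · exact lt_of_lt_of_le hxa ((List.pairwise_cons.mp hp).1 y hyt)

-- every element of the leading run equals x
lemma pvTake_eq (x : Int) (t : List Int) :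
    ∀ y ∈ t.takeWhile (fun y => y == x), y = x := by
  intro y hy
  have := List.mem_takeWhile_imp hy
  simpa using this

-- the run scan returns 0 as soon as a zero run is reached
lemma pvRunScan_zero :
    ∀ (l : List Int) (b bn : Int), l.Pairwise (· ≤ ·) → (0 : Int) ∈ l →
      pvRunScan l b bn = 0 := by
  intro l b bn
  induction l, b, bn using pvRunScan.induct with
  | case1 b bn => intro _ h; cases h
  | case2 b bn t =>
    intro _ _
    rw [pvRunScan]
    simp
  | case3 b bn x t hx hgt ih =>
    intro hp h0
    rw [pvRunScan]
    simp only [hx, if_false, hgt, if_true]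
    apply ih ((List.pairwise_cons.mp hp).2.sublist (List.dropWhile_sublist _))
    have h0t : (0 : Int) ∈ t := by
      rcases List.mem_cons.mp h0 with h | h
      · exact absurd h.symm hx
      · exact h
    rw [← List.takeWhile_append_dropWhile (p := fun y => y == x) (l := t)] at h0t
    rcases List.mem_append.mp h0t with h | h
    · exact absurd (pvTake_eq x t 0 h).symm hx
    · exact h
  | case4 b bn x t hx hgt ih =>
    intro hp h0
    rw [pvRunScan]
    simp only [hx, if_false, hgt, if_false]
    apply ih ((List.pairwise_cons.mp hp).2.sublist (List.dropWhile_sublist _))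
    have h0t : (0 : Int) ∈ t := by
      rcases List.mem_cons.mp h0 with h | h
      · exact absurd h.symm hx
      · exact h
    rw [← List.takeWhile_append_dropWhile (p := fun y => y == x) (l := t)] at h0t
    rcases List.mem_append.mp h0t with h | h
    · exact absurd (pvTake_eq x t 0 h).symm hx
    · exact h

-- counts in x :: t seen from the tail past the run
lemma pvRunCounts (x : Int) (t : List Int) (hp : (x :: t).Pairwise (· ≤ ·)) :
    ((x :: t).count x : Int) = 1 + ((t.takeWhile (fun y => y == x)).length : Int) ∧
    (∀ v ∈ t.dropWhile (fun y => y == x),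
        (x :: t).count v = (t.dropWhile (fun y => y == x)).count v) ∧
    (∀ v ∈ x :: t, v = x ∨ v ∈ t.dropWhile (fun y => y == x)) := by
  have hle : ∀ y ∈ t, x ≤ y := (List.pairwise_cons.mp hp).1
  have hpt : t.Pairwise (· ≤ ·) := (List.pairwise_cons.mp hp).2
  have hgt := pvDrop_gt x t hpt hle
  have hsplit := List.takeWhile_append_dropWhile (p := fun y => y == x) (l := t)
  refine ⟨?_, ?_, ?_⟩
  · have h1 : t.count x = (t.takeWhile (fun y => y == x)).length := by
      conv_lhs => rw [← hsplit]
      rw [List.count_append]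
      have hr : (t.dropWhile (fun y => y == x)).count x = 0 :=
        List.count_eq_zero_of_not_mem (fun h => lt_irrefl x (hgt x h))
      have htk : (t.takeWhile (fun y => y == x)).count x
          = (t.takeWhile (fun y => y == x)).length := by
        rw [List.count_eq_length]
        intro b hb
        exact (pvTake_eq x t b hb).symm
      omega
    rw [List.count_cons_self, h1]
    push_cast
    ring
  · intro v hv
    have hvx : v ≠ x := fun h => lt_irrefl x (h ▸ hgt v hv)
    rw [List.count_cons]
    simp only [beq_iff_eq, Ne.symm hvx, if_false]
    conv_lhs => rw [← hsplit]
    rw [List.count_append]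
    have : (t.takeWhile (fun y => y == x)).count v = 0 :=
      List.count_eq_zero_of_not_mem (fun h => hvx (pvTake_eq x t v h))
    omega
  · intro v hv
    rcases List.mem_cons.mp hv with rfl | hvt
    · exact Or.inl rfl
    · rw [← hsplit] at hvt
      rcases List.mem_append.mp hvt with h | h
      · exact Or.inl (pvTake_eq x t v h)
      · exact Or.inr h

-- the strictly-greater run scan over a sorted zero-free list computes the best value
lemma pvRunScan_spec :
    ∀ (l : List Int) (b bn : Int), l.Pairwise (· ≤ ·) → (0 : Int) ∉ l →
      (pvRunScan l b bn = b ∧ ∀ v ∈ l, (l.count v : Int) ≤ bn) ∨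
      (pvRunScan l b bn ∈ l ∧ bn < (l.count (pvRunScan l b bn) : Int) ∧
        ∀ v ∈ l, (l.count v : Int) < (l.count (pvRunScan l b bn) : Int) ∨
          ((l.count v : Int) = (l.count (pvRunScan l b bn) : Int) ∧ pvRunScan l b bn ≤ v)) := by
  intro l b bn
  induction l, b, bn using pvRunScan.induct with
  | case1 b bn =>
    intro _ _
    refine Or.inl ⟨?_, by simp⟩
    rw [pvRunScan]
  | case2 b bn t =>
    intro _ h0
    exact absurd List.mem_cons_self h0
  | case3 b bn x t hx hgt ih =>
    intro hp h0
    obtain ⟨hcx, hcrest, hmem⟩ := pvRunCounts x t hp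
    have hle : ∀ y ∈ t, x ≤ y := (List.pairwise_cons.mp hp).1
    have hgtx := pvDrop_gt x t (List.pairwise_cons.mp hp).2 hle
    have hrp : (t.dropWhile (fun y => y == x)).Pairwise (· ≤ ·) :=
      (List.pairwise_cons.mp hp).2.sublist (List.dropWhile_sublist _)
    have hr0 : (0 : Int) ∉ t.dropWhile (fun y => y == x) :=
      fun h => h0 (List.mem_cons_of_mem _ ((List.dropWhile_sublist _).mem h))
    have heq : pvRunScan (x :: t) b bn
        = pvRunScan (t.dropWhile (fun y => y == x)) x
            (1 + ((t.takeWhile (fun y => y == x)).length : Int)) := by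
      rw [pvRunScan]; simp only [hx, if_false, hgt, if_true]
    rcases ih hrp hr0 with ⟨hres, hall⟩ | ⟨h1, h2, h3⟩
    · rw [heq, hres]
      refine Or.inr ⟨List.mem_cons_self, ?_, ?_⟩
      · rw [hcx]; exact hgt
      · intro v hv
        rcases hmem v hv with rfl | hvr
        · exact Or.inr ⟨rfl, le_refl _⟩
        · rw [hcrest v hvr, hcx]
          rcases lt_or_eq_of_le (hall v hvr) with hlt | heqc
          · exact Or.inl (by exact_mod_cast hlt)
          · exact Or.inr ⟨by exact_mod_cast heqc, le_of_lt (hgtx v hvr)⟩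
    · rw [heq] at *
      set r := pvRunScan (t.dropWhile (fun y => y == x)) x
          (1 + ((t.takeWhile (fun y => y == x)).length : Int)) with hr
      refine Or.inr ⟨List.mem_cons_of_mem _ ((List.dropWhile_sublist _).mem h1), ?_, ?_⟩
      · rw [hcrest r h1]; omega
      · intro v hv
        rcases hmem v hv with rfl | hvr
        · rw [hcrest r h1, hcx]; exact Or.inl (by omega)
        · rw [hcrest r h1, hcrest v hvr]; exact h3 v hvr
  | case4 b bn x t hx hgt ih =>
    intro hp h0
    obtain ⟨hcx, hcrest, hmem⟩ := pvRunCounts x t hp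
    have hle : ∀ y ∈ t, x ≤ y := (List.pairwise_cons.mp hp).1
    have hrp : (t.dropWhile (fun y => y == x)).Pairwise (· ≤ ·) :=
      (List.pairwise_cons.mp hp).2.sublist (List.dropWhile_sublist _)
    have hr0 : (0 : Int) ∉ t.dropWhile (fun y => y == x) :=
      fun h => h0 (List.mem_cons_of_mem _ ((List.dropWhile_sublist _).mem h))
    have heq : pvRunScan (x :: t) b bn
        = pvRunScan (t.dropWhile (fun y => y == x)) b bn := by
      rw [pvRunScan]; simp only [hx, if_false, hgt, if_false]
    have hxle : (1 + ((t.takeWhile (fun y => y == x)).length : Int)) ≤ bn := by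
      omega
    rcases ih hrp hr0 with ⟨hres, hall⟩ | ⟨h1, h2, h3⟩
    · rw [heq, hres]
      refine Or.inl ⟨rfl, ?_⟩
      intro v hv
      rcases hmem v hv with rfl | hvr
      · rw [hcx]; exact hxle
      · rw [hcrest v hvr]
        exact_mod_cast le_trans (by exact_mod_cast hall v hvr) (le_refl bn)
    · rw [heq] at *
      set r := pvRunScan (t.dropWhile (fun y => y == x)) b bn with hr
      refine Or.inr ⟨List.mem_cons_of_mem _ ((List.dropWhile_sublist _).mem h1), ?_, ?_⟩
      · rw [hcrest r h1]; omega
      · intro v hv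
        rcases hmem v hv with rfl | hvr
        · rw [hcrest r h1, hcx]; exact Or.inl (by omega)
        · rw [hcrest r h1, hcrest v hvr]; exact h3 v hvr

-- B's core is the best value of the unsorted flattened list
lemma pvB_char (flat : List Int) (hne : flat ≠ []) (h0 : (0 : Int) ∉ flat) :
    pvBest flat (pvRunScan (PySem.List.sorted flat (fun x => x) false) 0 0) := by
  have hperm : (PySem.List.sorted flat (fun x => x) false).Perm flat :=
    PySem.List.sorted_perm flat (fun x => x) false
  have hp : (PySem.List.sorted flat (fun x => x) false).Pairwise (· ≤ ·) :=
    PySem.List.sorted_pairwise flat (fun x => x)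
  have h0s : (0 : Int) ∉ PySem.List.sorted flat (fun x => x) false :=
    fun h => h0 (hperm.mem_iff.mp h)
  have hcnt : ∀ v : Int, (PySem.List.sorted flat (fun x => x) false).count v = flat.count v :=
    fun v => hperm.count_eq v
  rcases pvRunScan_spec _ 0 0 hp h0s with ⟨-, hall⟩ | ⟨h1, h2, h3⟩
  · exfalso
    obtain ⟨x, hx⟩ := List.exists_mem_of_ne_nil flat hne
    have hxs : x ∈ PySem.List.sorted flat (fun x => x) false := hperm.mem_iff.mpr hx
    have hcx : 0 < (PySem.List.sorted flat (fun x => x) false).count x :=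
      List.count_pos_iff.mpr hxs
    have := hall x hxs
    omega
  · refine ⟨hperm.mem_iff.mp h1, ?_⟩
    intro d hd
    have := h3 d (hperm.mem_iff.mpr hd)
    rw [hcnt, hcnt] at this
    exact this

lemma pvOfList_ne_nil {xs : List Int} (h : xs ≠ []) : PySem.Set.ofList xs ≠ [] := by
  cases xs with
  | nil => exact absurd rfl h
  | cons x t => exact List.ne_nil_of_mem ((PySem.Set.mem_ofList _ _).mpr List.mem_cons_self)

-- ===== VERDICT (by name: the statement is the Claim_ definition above) =====
theorem background_color_py_spec : Claim_equal_background_color_py := by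
  intro grid _
  unfold Spec_background_color_py background_color_py background_color_py_alt
  have hc : pvCountsA grid = PySem.Dict.counter grid.flatten := by
    unfold pvCountsA
    rw [← List.foldl_flatten, PySem.Dict.foldl_insert_getD_add_one_eq_counter]
  rw [hc]
  set flat := grid.flatten with hf
  by_cases hni : flat = []
  · rw [hni]
    rfl
  · have h1 : (PySem.Dict.counter flat).items.isEmpty = false := by
      rw [PySem.Dict.items_counter, List.isEmpty_eq_false_iff]
      simp only [ne_eq, List.map_eq_nil_iff]
      exact pvOfList_ne_nil hni
    have hsne : PySem.List.sorted flat (fun x => x) false ≠ [] := by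
      intro h
      rw [PySem.List.sorted_eq_nil_iff] at h
      exact hni h
    have h0 : (PySem.List.sorted flat (fun x => x) false).isEmpty = false := by
      rwa [List.isEmpty_eq_false_iff]
    rw [h1, h0, PySem.Dict.contains_counter]
    by_cases hz : flat.contains 0
    · rw [hz]
      simp only [if_true]
      have h0m : (0 : Int) ∈ PySem.List.sorted flat (fun x => x) false := by
        rw [PySem.List.mem_sorted]
        exact List.contains_iff_mem.mp hz
      exact (pvRunScan_zero _ 0 0 (PySem.List.sorted_pairwise flat (fun x => x)) h0m).symm
    · rw [Bool.not_eq_true] at hz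
      rw [hz]
      simp only [Bool.false_eq_true, if_false]
      rw [PySem.Dict.items_counter]
      have h0 : (0 : Int) ∉ flat := by
        intro h
        rw [← List.contains_iff_mem] at h
        rw [h] at hz
        cases hz
      exact pvBest_uniq (pvA_char flat hni) (pvB_char flat hni h0)
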